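-- pv_equiv track=rewrite | github.com/GitBhembe/pracs | Ticktac.py | Add_Nums
-- ===== SOURCE A (Python) =====
-- def Add_Nums(Grid):
--     for r in range(len(Grid)):
--         for c in range(len(Grid)):
--             if r ==2 and c ==2:
--                 Grid[r][c] ="1"
--             elif r ==2 and c ==6:
--                 Grid[r][c] ="2"
--             elif r ==2 and c ==11:
--                 Grid[r][c] ="3"
--             elif r ==6 and c ==2:
--                 Grid[r][c] ="4"
--             elif r == 6 and c ==6:
--                 Grid[r][c] ="5"
--             elif r == 6 and c ==11:
--                 Grid[r][c] ="6"
--             elif r == 11 and c ==2: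
--                 Grid[r][c] ="7"
--             elif r ==11 and c ==6:
--                 Grid[r][c] ="8"
--             elif r ==11 and c ==11:
--                 Grid[r][c] ="9"
--
--     return Grid
-- ===== SOURCE B (Python) =====
-- def Add_Nums(Grid):
--     n = len(Grid)
--     for r, c, v in [(2, 2, "1"), (2, 6, "2"), (2, 11, "3"),
--                     (6, 2, "4"), (6, 6, "5"), (6, 11, "6"),
--                     (11, 2, "7"), (11, 6, "8"), (11, 11, "9")]:
--         if r < n and c < n:
--             Grid[r][c] = v
--     return Grid
-- ===== Notes on version B (the rewrite author's own statement) =====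
-- stated objective: simpler
-- what changed: Replaces the n*n scan over all (r,c) pairs with its 9-way if-chain by a single pass over a fixed list of the nine (row, col, digit) targets, writing each one under the same r < len(Grid) and c < len(Grid) bound A's ranges impose.
import Mathlib
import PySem

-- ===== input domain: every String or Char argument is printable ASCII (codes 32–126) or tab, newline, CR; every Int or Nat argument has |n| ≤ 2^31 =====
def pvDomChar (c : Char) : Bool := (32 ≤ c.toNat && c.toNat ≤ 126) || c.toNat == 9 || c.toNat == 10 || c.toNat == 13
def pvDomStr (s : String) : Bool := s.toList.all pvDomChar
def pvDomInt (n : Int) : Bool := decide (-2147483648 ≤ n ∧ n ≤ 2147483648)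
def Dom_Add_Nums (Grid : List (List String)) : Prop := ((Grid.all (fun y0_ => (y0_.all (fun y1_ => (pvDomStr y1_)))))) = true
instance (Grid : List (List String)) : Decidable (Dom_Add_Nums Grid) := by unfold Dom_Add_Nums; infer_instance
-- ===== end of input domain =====

-- B replaces A's n×n scan with a single pass over the nine fixed (row, col, digit) targets
-- (objective: simpler). Both Pythons mutate Grid in place and return it; the claim is about
-- the returned value (the in-place writes are the same nine cells).

-- `Grid[r][c] = v` for in-range r, c (Pre_ excludes the inputs where Python raises IndexError).
def setCell (g : List (List String)) (r c : Nat) (v : String) : List (List String) :=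
  g.modify r (fun row => row.set c v)

-- ===== PORT A =====
-- the body of A's double loop: the nine-way if-chain
def stepA (r c : Nat) (g : List (List String)) : List (List String) :=
  if r = 2 ∧ c = 2 then setCell g r c "1"
  else if r = 2 ∧ c = 6 then setCell g r c "2"
  else if r = 2 ∧ c = 11 then setCell g r c "3"
  else if r = 6 ∧ c = 2 then setCell g r c "4"
  else if r = 6 ∧ c = 6 then setCell g r c "5"
  else if r = 6 ∧ c = 11 then setCell g r c "6"
  else if r = 11 ∧ c = 2 then setCell g r c "7"
  else if r = 11 ∧ c = 6 then setCell g r c "8"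
  else if r = 11 ∧ c = 11 then setCell g r c "9"
  else g

def Add_Nums (Grid : List (List String)) : List (List String) :=
  (List.range Grid.length).foldl
    (fun g r => (List.range Grid.length).foldl (fun g c => stepA r c g) g) Grid

-- ===== PORT B =====
def targetsB : List (Nat × Nat × String) :=
  [(2, 2, "1"), (2, 6, "2"), (2, 11, "3"),
   (6, 2, "4"), (6, 6, "5"), (6, 11, "6"),
   (11, 2, "7"), (11, 6, "8"), (11, 11, "9")]

def Add_Nums_alt (Grid : List (List String)) : List (List String) :=
  let n := Grid.length
  targetsB.foldl
    (fun g t => if t.1 < n ∧ t.2.1 < n then setCell g t.1 t.2.1 t.2.2 else g) Grid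

-- ===== PRECONDITION & SPEC =====
-- Pre_ excludes exactly the jagged grids on which Python A raises IndexError: a target cell
-- (r, c) with r < len(Grid) and c < len(Grid) but row r shorter than c+1. (Python B raises
-- there identically; the Lean ports are total, so the proof itself holds unconditionally.)
def Pre_Add_Nums (Grid : List (List String)) : Prop :=
  ∀ p ∈ ([(2, 2), (2, 6), (2, 11), (6, 2), (6, 6), (6, 11),
          (11, 2), (11, 6), (11, 11)] : List (Nat × Nat)),
    p.1 < Grid.length → p.2 < Grid.length → p.2 < (Grid.getD p.1 []).length
instance (Grid : List (List String)) : Decidable (Pre_Add_Nums Grid) := by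
  unfold Pre_Add_Nums; infer_instance

def pvWitness_Add_Nums : List (List String) :=
  [["a", "b", "c"], ["d"], ["e", "f", "g"]]

def Spec_Add_Nums (Grid : List (List String)) (out : List (List String)) : Prop := out = Add_Nums_alt Grid
instance (Grid : List (List String)) (out : List (List String)) : Decidable (Spec_Add_Nums Grid out) := by unfold Spec_Add_Nums; infer_instance

-- ===== CLAIM (what is proved, stated in full; the proofs are below) =====
def Claim_equal_Add_Nums : Prop := ∀ (Grid : List (List String)), Dom_Add_Nums Grid → Pre_Add_Nums Grid → Spec_Add_Nums Grid (Add_Nums Grid)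

-- ===== LEMMAS AND PROOFS =====

-- A's inner loop over c ∈ range m, at row r
def innerRow (r m : Nat) (g : List (List String)) : List (List String) :=
  (List.range m).foldl (fun g c => stepA r c g) g

-- the effect of one row of A, written as a guarded chain over that row's target columns
def rowChain (r m : Nat) (cs : List (Nat × String)) (g : List (List String)) :
    List (List String) :=
  cs.foldl (fun g p => if p.1 < m then setCell g r p.1 p.2 else g) g

lemma innerRow_succ (r m : Nat) (g : List (List String)) :
    innerRow r (m + 1) g = stepA r m (innerRow r m g) := by
  simp [innerRow, List.range_succ]

lemma innerRow_other (r m : Nat) (g : List (List String))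
    (h2 : r ≠ 2) (h6 : r ≠ 6) (h11 : r ≠ 11) : innerRow r m g = g := by
  induction m with
  | zero => simp [innerRow]
  | succ m ih =>
    rw [innerRow_succ, ih]
    simp only [stepA]
    split_ifs <;> first | rfl | omega

-- stepA at a fixed target row, reduced to a three-way test on the column
lemma stepA_two (c : Nat) (g : List (List String)) :
    stepA 2 c g = if c = 2 then setCell g 2 2 "1" else if c = 6 then setCell g 2 6 "2"
      else if c = 11 then setCell g 2 11 "3" else g := by
  simp only [stepA]
  norm_num
  split_ifs <;> subst_vars <;> rfl

lemma stepA_six (c : Nat) (g : List (List String)) :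
    stepA 6 c g = if c = 2 then setCell g 6 2 "4" else if c = 6 then setCell g 6 6 "5"
      else if c = 11 then setCell g 6 11 "6" else g := by
  simp only [stepA]
  norm_num
  split_ifs <;> subst_vars <;> rfl

lemma stepA_eleven (c : Nat) (g : List (List String)) :
    stepA 11 c g = if c = 2 then setCell g 11 2 "7" else if c = 6 then setCell g 11 6 "8"
      else if c = 11 then setCell g 11 11 "9" else g := by
  simp only [stepA]
  norm_num
  split_ifs <;> subst_vars <;> rfl

-- rowChain on a three-element column list, unfolded
lemma rowChain_three (r m a b d : Nat) (u v w : String) (g : List (List String)) :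
    rowChain r m [(a, u), (b, v), (d, w)] g =
      (if d < m then (fun g => setCell g r d w) else id)
      ((if b < m then (fun g => setCell g r b v) else id)
      ((if a < m then (fun g => setCell g r a u) else id) g)) := by
  simp only [rowChain, List.foldl]
  split_ifs <;> rfl

lemma innerRow_two (m : Nat) (g : List (List String)) :
    innerRow 2 m g = rowChain 2 m [(2, "1"), (6, "2"), (11, "3")] g := by
  induction m with
  | zero => simp [innerRow, rowChain]
  | succ m ih =>
    rw [innerRow_succ, ih, stepA_two, rowChain_three, rowChain_three]
    split_ifs <;> first | rfl | omega

lemma innerRow_six (m : Nat) (g : List (List String)) :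
    innerRow 6 m g = rowChain 6 m [(2, "4"), (6, "5"), (11, "6")] g := by
  induction m with
  | zero => simp [innerRow, rowChain]
  | succ m ih =>
    rw [innerRow_succ, ih, stepA_six, rowChain_three, rowChain_three]
    split_ifs <;> first | rfl | omega

lemma innerRow_eleven (m : Nat) (g : List (List String)) :
    innerRow 11 m g = rowChain 11 m [(2, "7"), (6, "8"), (11, "9")] g := by
  induction m with
  | zero => simp [innerRow, rowChain]
  | succ m ih =>
    rw [innerRow_succ, ih, stepA_eleven, rowChain_three, rowChain_three]
    split_ifs <;> first | rfl | omega

-- A's outer loop over r ∈ range k, with column bound n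
def outerAux (k n : Nat) (g : List (List String)) : List (List String) :=
  (List.range k).foldl (fun g r => innerRow r n g) g

-- the effect of A's outer loop, row by row
def chainRows (k n : Nat) (g : List (List String)) : List (List String) :=
  let g1 := if 2 < k then rowChain 2 n [(2, "1"), (6, "2"), (11, "3")] g else g
  let g2 := if 6 < k then rowChain 6 n [(2, "4"), (6, "5"), (11, "6")] g1 else g1
  if 11 < k then rowChain 11 n [(2, "7"), (6, "8"), (11, "9")] g2 else g2

lemma outerAux_succ (k n : Nat) (g : List (List String)) :
    outerAux (k + 1) n g = innerRow k n (outerAux k n g) := by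
  simp [outerAux, List.range_succ]

lemma outerAux_eq_chainRows (k n : Nat) (g : List (List String)) :
    outerAux k n g = chainRows k n g := by
  induction k with
  | zero => simp [outerAux, chainRows]
  | succ k ih =>
    rw [outerAux_succ, ih]
    by_cases hk2 : k = 2
    · subst hk2
      rw [innerRow_two]
      simp only [chainRows]
      split_ifs <;> first | rfl | omega
    · by_cases hk6 : k = 6
      · subst hk6
        rw [innerRow_six]
        simp only [chainRows]
        split_ifs <;> first | rfl | omega
      · by_cases hk11 : k = 11
        · subst hk11
          rw [innerRow_eleven]
          simp only [chainRows]
          split_ifs <;> first | rfl | omega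
        · rw [innerRow_other k n _ hk2 hk6 hk11]
          simp only [chainRows]
          split_ifs <;> first | rfl | omega

lemma Add_Nums_eq_chainRows (Grid : List (List String)) :
    Add_Nums Grid = chainRows Grid.length Grid.length Grid := by
  rw [← outerAux_eq_chainRows]; rfl

lemma chainRows_eq_alt (Grid : List (List String)) :
    chainRows Grid.length Grid.length Grid = Add_Nums_alt Grid := by
  by_cases h2 : 2 < Grid.length <;> by_cases h6 : 6 < Grid.length <;>
    by_cases h11 : 11 < Grid.length <;>
    simp [chainRows, rowChain, Add_Nums_alt, targetsB, List.foldl, h2, h6, h11]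

-- ===== VERDICT (by name: the statement is the Claim_ definition above) =====
theorem Add_Nums_spec : Claim_equal_Add_Nums := by
  intro Grid _ _
  unfold Spec_Add_Nums
  rw [Add_Nums_eq_chainRows, chainRows_eq_alt]
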